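-- pv_equiv track=rewrite | github.com/Bandi-Lavanya/DSA-Python- | stacksAndQueues/nextSmallestEle(circular).py | circular_nse_optimal
-- ===== SOURCE A (Python) =====
-- def circular_nse_optimal(arr):
--     n = len(arr)
--     res = [-1] * n
--     stack = []  # stores indices
--
--     for i in range(2 * n - 1, -1, -1):
--         while stack and arr[stack[-1]] >= arr[i % n]:
--             stack.pop()
--         if stack:
--             res[i % n] = arr[stack[-1]]
--         stack.append(i % n)
--
--     return res
-- ===== SOURCE B (Python) =====
-- def circular_nse_optimal(arr):
--     n = len(arr)
--     res = [-1] * n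
--     for i in range(n):
--         for j in range(1, n):
--             k = (i + j) % n
--             if arr[k] < arr[i]:
--                 res[i] = arr[k]
--                 break
--     return res
-- ===== Notes on version B (the rewrite author's own statement) =====
-- stated objective: alternative
-- what changed: Replaced the reverse two-lap monotonic index stack with a per-position forward circular brute-force scan: each res[i] is found independently as the first strictly smaller element among the next n-1 circular positions, no stack and no second lap.
import Mathlib
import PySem

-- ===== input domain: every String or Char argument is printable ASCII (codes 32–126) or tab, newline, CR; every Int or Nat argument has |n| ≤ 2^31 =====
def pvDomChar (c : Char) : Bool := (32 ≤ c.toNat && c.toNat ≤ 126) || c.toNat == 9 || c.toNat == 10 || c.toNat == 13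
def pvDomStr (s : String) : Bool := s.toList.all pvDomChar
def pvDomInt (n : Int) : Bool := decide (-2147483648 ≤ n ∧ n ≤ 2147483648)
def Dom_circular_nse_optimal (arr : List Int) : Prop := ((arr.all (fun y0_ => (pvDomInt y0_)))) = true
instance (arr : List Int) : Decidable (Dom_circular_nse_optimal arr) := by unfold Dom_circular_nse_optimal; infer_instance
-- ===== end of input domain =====

-- B replaces A's reverse two-lap monotonic index stack by an independent forward circular
-- brute-force scan per position (objective: alternative decomposition, not faster).

-- ===== PORT A =====
-- 'while stack and arr[stack[-1]] >= arr[i % n]: stack.pop()' — head of the list is the stack top.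
-- Every index on the stack is in range (it is some 'i % n'), so pyGetD's default is never consulted.
def pvPopA (arr : List Int) (v : Int) : List Int → List Int
  | [] => []
  | t :: rest => if PySem.List.pyGetD arr t 0 ≥ v then pvPopA arr v rest else t :: rest

def pvStepA (arr : List Int) (st : List Int × List Int) (i : Int) : List Int × List Int :=
  let n : Int := arr.length
  let idx := PySem.Int.mod i n
  let cur := PySem.List.pyGetD arr idx 0
  let stack := pvPopA arr cur st.2
  let res := match stack with
    | [] => st.1
    | t :: _ => PySem.List.pySetD st.1 idx (PySem.List.pyGetD arr t 0)
  (res, idx :: stack)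

def circular_nse_optimal (arr : List Int) : List Int :=
  let n : Int := arr.length
  ((PySem.List.pyRange (2 * n - 1) (-1) (-1)).foldl (pvStepA arr) (List.replicate arr.length (-1), [])).1

-- ===== PORT B =====
-- 'for j in range(1, n): k = (i + j) % n; if arr[k] < arr[i]: res[i] = arr[k]; break'
def pvScanB (arr : List Int) (n i : Nat) : List Nat → Int
  | [] => -1
  | j :: js =>
    let k := (i + j) % n
    if arr.getD k 0 < arr.getD i 0 then arr.getD k 0 else pvScanB arr n i js

def circular_nse_optimal_alt (arr : List Int) : List Int :=
  let n := arr.length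
  (List.range n).map (fun i => pvScanB arr n i (List.range' 1 (n - 1)))

-- ===== PRECONDITION & SPEC =====
def Spec_circular_nse_optimal (arr : List Int) (out : List Int) : Prop := out = circular_nse_optimal_alt arr
instance (arr : List Int) (out : List Int) : Decidable (Spec_circular_nse_optimal arr out) := by unfold Spec_circular_nse_optimal; infer_instance

-- ===== CLAIM (what is proved, stated in full; the proofs are below) =====
def Claim_equal_circular_nse_optimal : Prop := ∀ (arr : List Int), Dom_circular_nse_optimal arr → Spec_circular_nse_optimal arr (circular_nse_optimal arr)

-- ===== LEMMAS AND PROOFS =====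

/-- `aF arr j` = the Python value `arr[j % n]` seen at virtual position `j` of A's two laps. -/
def aF (arr : List Int) (j : Nat) : Int := arr.getD (j % arr.length) 0

/-- A virtual position `j` survives on A's stack at boundary `i` iff its value is strictly
below every value at positions `[i, j)`. -/
def okJ (arr : List Int) (i j : Nat) : Bool := decide (∀ k ∈ List.range' i (j - i), aF arr j < aF arr k)

/-- Specification of A's stack (top first) after processing all positions `≥ i`. -/
def sSpec (arr : List Int) (i : Nat) : List Nat :=
  (List.range' i (2 * arr.length - i)).filter (okJ arr i)

/-- What A actually stores on the stack: `j % n` as an `Int`. -/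
def stMap (arr : List Int) (l : List Nat) : List Int := l.map (fun j => ((j % arr.length : Nat) : Int))

/-- First strictly-smaller value at a virtual position in `[s, 2n)`, else `-1`. -/
def ansFrom (arr : List Int) (s p : Nat) : Int :=
  match (List.range' s (2 * arr.length - s)).find? (fun j => decide (aF arr j < aF arr p)) with
  | some j => aF arr j
  | none => -1

/-- Specification of `res[p]` after processing all positions `≥ i`. -/
def resSpec (arr : List Int) (i p : Nat) : Int :=
  if i ≤ p then ansFrom arr (p + 1) p
  else if i ≤ p + arr.length then ansFrom arr (p + arr.length + 1) p
  else -1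

def StInv (arr : List Int) (b : Nat) (st : List Int × List Int) : Prop :=
  st.1.length = arr.length ∧ (∀ p < arr.length, st.1.getD p 0 = resSpec arr b p) ∧
  st.2 = stMap arr (sSpec arr b)

theorem aF_mod (arr : List Int) (j : Nat) : aF arr (j % arr.length) = aF arr j := by
  simp [aF]

theorem aF_add_len (arr : List Int) (j : Nat) : aF arr (j + arr.length) = aF arr j := by
  simp [aF, Nat.add_mod_right]

theorem pvGet_idx (arr : List Int) (j : Nat) :
    PySem.List.pyGetD arr (((j % arr.length : Nat) : Int)) 0 = aF arr j := by
  rw [PySem.List.pyGetD_natCast]; rfl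

theorem mem_sSpec (arr : List Int) (i j : Nat) :
    j ∈ sSpec arr i ↔ i ≤ j ∧ j < 2 * arr.length ∧
      ∀ k, i ≤ k → k < j → aF arr j < aF arr k := by
  simp only [sSpec, List.mem_filter, List.mem_range'_1, okJ, decide_eq_true_eq]
  constructor
  · rintro ⟨⟨h1, h2⟩, h3⟩
    exact ⟨h1, by omega, fun k hk1 hk2 => h3 k ⟨hk1, by omega⟩⟩
  · rintro ⟨h1, h2, h3⟩
    exact ⟨⟨h1, by omega⟩, fun k hk => h3 k hk.1 (by omega)⟩

theorem sSpec_pairwise (arr : List Int) (i : Nat) :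
    (sSpec arr i).Pairwise (fun j j' => aF arr j' < aF arr j) := by
  have h1 : (sSpec arr i).Pairwise (· < ·) :=
    (List.pairwise_lt_range' 1).sublist List.filter_sublist
  refine h1.imp_of_mem ?_
  intro a b ha hb hab
  rcases (mem_sSpec arr i a).1 ha with ⟨hia, _, _⟩
  rcases (mem_sSpec arr i b).1 hb with ⟨_, _, hball⟩
  exact hball a hia hab

theorem sSpec_top (arr : List Int) : sSpec arr (2 * arr.length) = [] := by
  simp [sSpec]

theorem pvPopA_stMap (arr : List Int) (v : Int) (l : List Nat)
    (hpw : l.Pairwise (fun j j' => aF arr j' < aF arr j)) :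
    pvPopA arr v (stMap arr l) = stMap arr (l.filter (fun j => decide (aF arr j < v))) := by
  induction l with
  | nil => rfl
  | cons j js ih =>
    rcases List.pairwise_cons.1 hpw with ⟨hj, hjs⟩
    have hmc : stMap arr (j :: js) = ((j % arr.length : Nat) : Int) :: stMap arr js := rfl
    rw [hmc, pvPopA, pvGet_idx]
    by_cases hge : aF arr j ≥ v
    · rw [if_pos hge, ih hjs, List.filter_cons, if_neg (by simp; omega)]
    · rw [if_neg hge, List.filter_cons, if_pos (by simp; omega)]
      have hall : js.filter (fun j => decide (aF arr j < v)) = js := by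
        apply List.filter_eq_self.2
        intro x hx
        simp only [decide_eq_true_eq]
        exact lt_trans (hj x hx) (by omega)
      rw [hall, hmc]

theorem sSpec_cons (arr : List Int) (b : Nat) (hb : b < 2 * arr.length) :
    sSpec arr b = b :: (sSpec arr (b + 1)).filter (fun j => decide (aF arr j < aF arr b)) := by
  unfold sSpec
  rw [show 2 * arr.length - b = (2 * arr.length - (b + 1)) + 1 from by omega, List.range'_succ,
    List.filter_cons, if_pos (by simp [okJ]), List.filter_filter]
  congr 1
  apply List.filter_congr
  intro j hj
  rw [List.mem_range'_1] at hj
  have hsp : List.range' b (j - b) = b :: List.range' (b + 1) (j - (b + 1)) := by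
    rw [show j - b = (j - (b + 1)) + 1 from by omega, List.range'_succ]
  simp only [okJ]
  rw [hsp]
  by_cases h1 : aF arr j < aF arr b <;>
    by_cases h2 : ∀ k ∈ List.range' (b + 1) (j - (b + 1)), aF arr j < aF arr k <;>
    simp [h1]

/-- The least position in `[b+1, 2n)` whose value is below `aF b` is on the stack. -/
theorem exists_min_mem (arr : List Int) (b : Nat)
    (h : ∃ j, (b + 1 ≤ j ∧ j < 2 * arr.length) ∧ aF arr j < aF arr b) :
    ∃ j0, j0 ∈ sSpec arr (b + 1) ∧ aF arr j0 < aF arr b ∧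
      ∀ k, (b + 1 ≤ k ∧ k < 2 * arr.length) ∧ aF arr k < aF arr b → j0 ≤ k := by
  refine ⟨Nat.find h, ?_, (Nat.find_spec h).2, fun k hk => Nat.find_min' h hk⟩
  obtain ⟨⟨h1, h2⟩, h3⟩ := Nat.find_spec h
  rw [mem_sSpec]
  refine ⟨h1, h2, fun k hk1 hk2 => ?_⟩
  have hnk := Nat.find_min h hk2
  have : ¬ aF arr k < aF arr b := fun hc => hnk ⟨⟨hk1, by omega⟩, hc⟩
  omega

theorem no_smaller_of_empty (arr : List Int) (b : Nat)
    (hF : (sSpec arr (b + 1)).filter (fun j => decide (aF arr j < aF arr b)) = []) :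
    ∀ j, b + 1 ≤ j → j < 2 * arr.length → ¬ aF arr j < aF arr b := by
  intro j hj1 hj2 hc
  obtain ⟨j0, hmem, hlt, _⟩ := exists_min_mem arr b ⟨j, ⟨hj1, hj2⟩, hc⟩
  have : j0 ∈ (sSpec arr (b + 1)).filter (fun j => decide (aF arr j < aF arr b)) :=
    List.mem_filter.2 ⟨hmem, by simpa using hlt⟩
  simp [hF] at this

theorem ansFrom_eq_neg_one (arr : List Int) (s p : Nat)
    (h : ∀ j, s ≤ j → j < 2 * arr.length → ¬ aF arr j < aF arr p) :
    ansFrom arr s p = -1 := by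
  unfold ansFrom
  rw [List.find?_eq_none.2 (fun x hx => by
    rw [List.mem_range'_1] at hx
    simpa using h x hx.1 (by omega))]

theorem bmod_eq (arr : List Int) (b : Nat) (hb : b < 2 * arr.length) :
    b % arr.length = if b < arr.length then b else b - arr.length := by
  split_ifs with h
  · exact Nat.mod_eq_of_lt h
  · rw [Nat.mod_eq_sub_mod (by omega)]
    exact Nat.mod_eq_of_lt (by omega)

theorem resSpec_stable (arr : List Int) (b p : Nat) (hb : b < 2 * arr.length)
    (hp : p < arr.length) (hne : p ≠ b % arr.length) :
    resSpec arr b p = resSpec arr (b + 1) p := by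
  have hm := bmod_eq arr b hb
  rcases Nat.lt_or_ge b arr.length with hbn | hbn
  · have hpb : p ≠ b := by rw [hm, if_pos hbn] at hne; exact hne
    unfold resSpec
    split_ifs <;> first | rfl | omega
  · have hpb : p ≠ b - arr.length := by rw [hm, if_neg (by omega)] at hne; exact hne
    unfold resSpec
    split_ifs <;> first | rfl | omega

theorem resSpec_self (arr : List Int) (b : Nat) (hb : b < 2 * arr.length) (hn : 0 < arr.length) :
    resSpec arr b (b % arr.length) = ansFrom arr (b + 1) (b % arr.length) := by
  have hm := bmod_eq arr b hb
  rcases Nat.lt_or_ge b arr.length with hbn | hbn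
  · rw [hm, if_pos hbn]
    unfold resSpec
    rw [if_pos (le_refl b)]
  · rw [hm, if_neg (by omega)]
    unfold resSpec
    rw [if_neg (by omega), if_pos (by omega),
      show b - arr.length + arr.length + 1 = b + 1 from by omega]

theorem resSpec_succ_self_empty (arr : List Int) (b : Nat) (hb : b < 2 * arr.length)
    (hn : 0 < arr.length)
    (hns : ∀ j, b + 1 ≤ j → j < 2 * arr.length → ¬ aF arr j < aF arr b) :
    resSpec arr (b + 1) (b % arr.length) = -1 := by
  have hm := bmod_eq arr b hb
  have haux : ∀ s p, b + 1 ≤ s → aF arr p = aF arr b → ansFrom arr s p = -1 := by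
    intro s p hs hep
    apply ansFrom_eq_neg_one
    intro j hj1 hj2
    rw [hep]
    exact hns j (by omega) hj2
  rcases Nat.lt_or_ge b arr.length with hbn | hbn
  · rw [hm, if_pos hbn]
    unfold resSpec
    rw [if_neg (by omega), if_pos (by omega)]
    exact haux (b + arr.length + 1) b (by omega) rfl
  · rw [hm, if_neg (by omega)]
    unfold resSpec
    rw [if_neg (by omega), if_neg (by omega)]

/-- With a non-empty popped stack, its top is the first strictly smaller position after `b`. -/
theorem ansFrom_head (arr : List Int) (b t : Nat) (F' : List Nat) (hb : b < 2 * arr.length)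
    (hF : (sSpec arr (b + 1)).filter (fun j => decide (aF arr j < aF arr b)) = t :: F') :
    ansFrom arr (b + 1) (b % arr.length) = aF arr t := by
  have hpred : (fun j => decide (aF arr j < aF arr (b % arr.length))) =
      (fun j => decide (aF arr j < aF arr b)) := by
    funext j; rw [aF_mod]
  have hhead : (sSpec arr (b + 1)).find? (fun j => decide (aF arr j < aF arr b)) = some t := by
    rw [← List.head?_filter, hF]; rfl
  have htmem : t ∈ sSpec arr (b + 1) := List.mem_of_find?_eq_some hhead
  have htlt : aF arr t < aF arr b := by simpa using List.find?_some hhead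
  obtain ⟨ht1, ht2, htmin⟩ := (mem_sSpec arr (b + 1) t).1 htmem
  -- no position in [b+1, t) is strictly smaller than aF b
  have hbefore : ∀ k, b + 1 ≤ k → k < t → ¬ aF arr k < aF arr b := by
    intro k hk1 hk2 hc
    obtain ⟨j0, hj0mem, hj0lt, hj0min⟩ := exists_min_mem arr b ⟨k, ⟨hk1, by omega⟩, hc⟩
    have hj0F : j0 ∈ t :: F' := by
      rw [← hF]; exact List.mem_filter.2 ⟨hj0mem, by simpa using hj0lt⟩
    have hj0k : j0 ≤ k := hj0min k ⟨⟨hk1, by omega⟩, hc⟩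
    -- every element of t :: F' is ≥ t
    have hpw : (t :: F').Pairwise (· < ·) := by
      rw [← hF]
      exact (List.pairwise_lt_range' 1).sublist
        (List.filter_sublist.trans List.filter_sublist)
    rcases List.mem_cons.1 hj0F with rfl | hj0F'
    · omega
    · have := (List.pairwise_cons.1 hpw).1 j0 hj0F'
      omega
  unfold ansFrom
  rw [hpred]
  have hsplit : List.range' (b + 1) (2 * arr.length - (b + 1)) =
      List.range' (b + 1) (t - (b + 1)) ++ t :: List.range' (t + 1) (2 * arr.length - (t + 1)) := by
    rw [show 2 * arr.length - (b + 1) = (t - (b + 1)) + (2 * arr.length - t) from by omega,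
      ← List.range'_append_1, show b + 1 + (t - (b + 1)) = t from by omega,
      show 2 * arr.length - t = (2 * arr.length - (t + 1)) + 1 from by omega,
      List.range'_succ]
  rw [hsplit, List.find?_append, List.find?_eq_none.2 (fun x hx => by
      rw [List.mem_range'_1] at hx
      simpa using hbefore x hx.1 (by omega)),
    Option.none_or, List.find?_cons, show (decide (aF arr t < aF arr b)) = true from by simpa using htlt]

theorem pvStepA_def (arr : List Int) (st : List Int × List Int) (i : Int) :
    pvStepA arr st i =
      (match pvPopA arr (PySem.List.pyGetD arr (PySem.Int.mod i (arr.length : Int)) 0) st.2 with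
        | [] => st.1
        | t :: _ => PySem.List.pySetD st.1 (PySem.Int.mod i (arr.length : Int))
            (PySem.List.pyGetD arr t 0),
       PySem.Int.mod i (arr.length : Int) ::
         pvPopA arr (PySem.List.pyGetD arr (PySem.Int.mod i (arr.length : Int)) 0) st.2) := rfl

theorem step_inv (arr : List Int) (b : Nat) (hb : b < 2 * arr.length)
    (st : List Int × List Int) (h : StInv arr (b + 1) st) :
    StInv arr b (pvStepA arr st ((b : Nat) : Int)) := by
  obtain ⟨hlen, hres, hstk⟩ := h
  have hn : 0 < arr.length := by omega
  have hpop : pvPopA arr (aF arr b) (stMap arr (sSpec arr (b + 1))) =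
      stMap arr ((sSpec arr (b + 1)).filter (fun j => decide (aF arr j < aF arr b))) :=
    pvPopA_stMap arr _ _ (sSpec_pairwise arr (b + 1))
  rw [pvStepA_def, PySem.Int.mod_natCast, pvGet_idx, hstk, hpop]
  unfold StInv
  rcases hFc : (sSpec arr (b + 1)).filter (fun j => decide (aF arr j < aF arr b)) with _ | ⟨t, F'⟩
  · -- stack popped empty: res unchanged
    have hns := no_smaller_of_empty arr b hFc
    simp only [stMap, List.map_nil]
    refine ⟨hlen, fun p hp => ?_, ?_⟩
    · rw [hres p hp]
      by_cases hpb : p = b % arr.length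
      · subst hpb
        rw [resSpec_succ_self_empty arr b hb hn hns, resSpec_self arr b hb hn,
          ansFrom_eq_neg_one arr (b + 1) (b % arr.length)
            (fun j h1 h2 => by rw [aF_mod]; exact hns j h1 h2)]
      · exact (resSpec_stable arr b p hb hp hpb).symm
    · rw [sSpec_cons arr b hb, hFc]
      rfl
  · -- stack non-empty: res[b % n] := arr[stack top]
    simp only [stMap, List.map_cons]
    rw [PySem.List.pySetD_natCast, pvGet_idx]
    refine ⟨by simp [hlen], fun p hp => ?_, ?_⟩
    · by_cases hpb : p = b % arr.length
      · subst hpb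
        rw [List.getD_eq_getElem?_getD, List.getElem?_set, if_pos rfl, if_pos (by omega)]
        simp only [Option.getD_some]
        rw [resSpec_self arr b hb hn, ansFrom_head arr b t F' hb hFc]
      · rw [List.getD_eq_getElem?_getD, List.getElem?_set, if_neg (fun hc => hpb hc.symm),
          ← List.getD_eq_getElem?_getD, hres p hp]
        exact (resSpec_stable arr b p hb hp hpb).symm
    · rw [sSpec_cons arr b hb, hFc]
      rfl

theorem fold_down (arr : List Int) : ∀ (m : Nat) (st : List Int × List Int),
    m ≤ 2 * arr.length → StInv arr m st →
    StInv arr 0 ((PySem.List.pyRange ((m : Int) - 1) (-1) (-1)).foldl (pvStepA arr) st) := by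
  intro m
  induction m with
  | zero =>
    intro st _ h
    rw [PySem.List.pyRange_neg_one_eq_nil (by omega)]
    exact h
  | succ k ih =>
    intro st hm h
    rw [show ((k + 1 : Nat) : Int) - 1 = ((k : Nat) : Int) from by push_cast; ring,
      PySem.List.pyRange_neg_one_cons (by omega),
      List.foldl_cons]
    exact ih _ (by omega) (step_inv arr k (by omega) st h)

theorem init_inv (arr : List Int) :
    StInv arr (2 * arr.length) (List.replicate arr.length (-1), []) := by
  refine ⟨by simp, fun p hp => ?_, ?_⟩
  · rw [List.getD_eq_getElem?_getD, List.getElem?_replicate, if_pos hp]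
    unfold resSpec
    rw [if_neg (by omega), if_neg (by omega)]
    rfl
  · rw [sSpec_top]
    rfl

theorem scanB_eq_find (arr : List Int) (p : Nat) (hp : p < arr.length) (l : List Nat) :
    pvScanB arr arr.length p l =
      match l.find? (fun j => decide (aF arr (p + j) < aF arr p)) with
      | some j => aF arr (p + j)
      | none => -1 := by
  have hself : arr.getD p 0 = aF arr p := by rw [aF, Nat.mod_eq_of_lt hp]
  induction l with
  | nil => rfl
  | cons j js ih =>
    have hoff : arr.getD ((p + j) % arr.length) 0 = aF arr (p + j) := rfl
    simp only [pvScanB]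
    rw [List.find?_cons]
    by_cases hc : aF arr (p + j) < aF arr p
    · rw [if_pos (by rw [hoff, hself]; exact hc), show (decide (aF arr (p + j) < aF arr p)) = true from by simpa using hc]
      exact hoff
    · rw [if_neg (by rw [hoff, hself]; exact hc), show (decide (aF arr (p + j) < aF arr p)) = false from by simpa using hc]
      exact ih

theorem bridge (arr : List Int) (p : Nat) (hp : p < arr.length) :
    ansFrom arr (p + 1) p = pvScanB arr arr.length p (List.range' 1 (arr.length - 1)) := by
  have hn : 0 < arr.length := by omega
  rw [scanB_eq_find arr p hp]
  unfold ansFrom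
  rw [show 2 * arr.length - (p + 1) = (arr.length - 1) + (arr.length - p) from by omega,
    ← List.range'_append_1, show p + 1 + (arr.length - 1) = p + arr.length from by omega,
    show List.range' (p + 1) (arr.length - 1) =
      (List.range' 1 (arr.length - 1)).map (fun x => p + x) from
        (List.map_add_range' 1 (arr.length - 1) 1).symm,
    List.find?_append, List.find?_map]
  rcases hfo : (List.range' 1 (arr.length - 1)).find?
      (fun j => decide (aF arr (p + j) < aF arr p)) with _ | j
  · have hnone2 : (List.range' (p + arr.length) (arr.length - p)).find?
        (fun j => decide (aF arr j < aF arr p)) = none := by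
      rw [List.find?_eq_none]
      intro x hx
      rw [List.mem_range'_1] at hx
      simp only [decide_eq_true_eq, not_lt]
      have hxe : aF arr x = aF arr (x - arr.length) := by
        conv_lhs => rw [show x = (x - arr.length) + arr.length from by omega]
        rw [aF_add_len]
      by_cases hxp : x - arr.length = p
      · rw [hxe, hxp]
      · have hj : (x - arr.length - p) ∈ List.range' 1 (arr.length - 1) := by
          rw [List.mem_range'_1]; omega
        have := List.find?_eq_none.1 hfo _ hj
        simp only [decide_eq_true_eq, not_lt] at this
        rw [hxe, show x - arr.length = p + (x - arr.length - p) from by omega]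
        exact this
    have hcomp : ((List.range' 1 (arr.length - 1)).find?
        ((fun j => decide (aF arr j < aF arr p)) ∘ (fun x => p + x))) = none := by
      rw [show ((fun j => decide (aF arr j < aF arr p)) ∘ (fun x => p + x)) =
        (fun j => decide (aF arr (p + j) < aF arr p)) from rfl, hfo]
    rw [hcomp, hnone2]
    rfl
  · have hcomp : ((List.range' 1 (arr.length - 1)).find?
        ((fun j => decide (aF arr j < aF arr p)) ∘ (fun x => p + x))) = some j := by
      rw [show ((fun j => decide (aF arr j < aF arr p)) ∘ (fun x => p + x)) =
        (fun j => decide (aF arr (p + j) < aF arr p)) from rfl, hfo]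
    rw [hcomp]
    rfl

-- ===== VERDICT (by name: the statement is the Claim_ definition above) =====
theorem circular_nse_optimal_spec : Claim_equal_circular_nse_optimal := by
  intro arr _
  unfold Spec_circular_nse_optimal
  rcases Nat.eq_zero_or_pos arr.length with h0 | hn
  · rw [List.length_eq_zero_iff.1 h0]
    decide
  · have hfold := fold_down arr (2 * arr.length) (List.replicate arr.length (-1), [])
      (le_refl _) (init_inv arr)
    obtain ⟨hl, hres, _⟩ := hfold
    unfold circular_nse_optimal circular_nse_optimal_alt
    dsimp only
    rw [show 2 * ((arr.length : Nat) : Int) - 1 = ((2 * arr.length : Nat) : Int) - 1 from by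
      push_cast; ring]
    apply List.ext_getElem
    · rw [hl]; simp
    · intro i h1 h2
      have hi : i < arr.length := by simpa using h2
      have hgl := hres i hi
      rw [List.getD_eq_getElem?_getD, List.getElem?_eq_getElem h1] at hgl
      simp only [Option.getD_some] at hgl
      rw [hgl, List.getElem_map, List.getElem_range]
      unfold resSpec
      rw [if_pos (by omega)]
      exact bridge arr i hi
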